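-- pv_equiv track=rewrite | github.com/pypi-data/pypi-mirror-224 | packages/nanolog-parser/nanolog_parser-0.0.1.tar.gz/nanolog_parser-0.0.1/nanolog_parser/src/message_parsers/log_parser.py | _add_quotes_to_keys_fast
-- ===== SOURCE A (Python) =====
-- def _add_quotes_to_keys_fast(logline):
--     words = logline.split('=')
--     for i in range(len(words) - 1):
--         last_space = words[i].rfind(' ')
--         if last_space != -1:
--             pre_space = words[i][:last_space]
--             post_space = words[i][last_space+1:]
--             words[i] = f'{pre_space} "{post_space}"'
--         else:
--             words[i] = f'"{words[i]}"'
--     return ':'.join(words)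
-- ===== SOURCE B (Python) =====
-- def _add_quotes_to_keys_fast(logline):
--     # Single left-to-right pass: accumulate the current key token (a run of
--     # characters that are neither space nor '='); on '=' emit it quoted followed
--     # by ':', on a space flush it unchanged.
--     out = []
--     run = []
--     for ch in logline:
--         if ch == '=':
--             out.append('"')
--             out.extend(run)
--             out.append('":')
--             run = []
--         elif ch == ' ':
--             out.extend(run)
--             out.append(' ')
--             run = []
--         else:
--             run.append(ch)
--     out.extend(run)
--     return ''.join(out)
-- ===== Notes on version B (the rewrite author's own statement) =====
-- stated objective: alternative
-- what changed: A splits the line at the key/value separator, rewrites every piece but the last by slicing it at its last space, and rejoins the pieces; B never splits: it makes one left-to-right character scan that accumulates the current key token and emits it quoted, with a colon, whenever the separator arrives.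
import Mathlib
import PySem

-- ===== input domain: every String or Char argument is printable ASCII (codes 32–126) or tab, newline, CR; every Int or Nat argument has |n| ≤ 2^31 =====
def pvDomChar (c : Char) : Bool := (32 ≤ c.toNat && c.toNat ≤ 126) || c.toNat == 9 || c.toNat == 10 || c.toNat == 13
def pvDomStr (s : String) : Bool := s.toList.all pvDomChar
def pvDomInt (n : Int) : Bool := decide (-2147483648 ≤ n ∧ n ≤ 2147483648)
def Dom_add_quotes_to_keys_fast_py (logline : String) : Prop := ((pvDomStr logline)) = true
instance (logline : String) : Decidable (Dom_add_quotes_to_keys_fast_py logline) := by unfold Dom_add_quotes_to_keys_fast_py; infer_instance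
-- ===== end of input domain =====

-- B replaces A's split/rfind/slice/join pipeline by a single left-to-right scan that
-- quotes the pending key token whenever it meets the key/value separator; objective: alternative.

-- ===== PORT A =====
-- words[i] = ... for rfind(' ') != -1 / else branches of the loop body
def pvFixWord (w : List Char) : List Char :=
  let last_space := PySem.Chars.rfind w [' ']
  if last_space ≠ -1 then
    let pre_space := PySem.List.slice w none (some last_space)
    let post_space := PySem.List.slice w (some (last_space + 1)) none
    pre_space ++ ' ' :: '"' :: post_space ++ ['"']
  else
    '"' :: w ++ ['"']

-- the loop 'for i in range(len(words) - 1)' rewrites every word except the last;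
-- it becomes the obvious structural recursion over the word list
def pvLoopA : List (List Char) → List (List Char)
  | [] => []
  | [w] => [w]
  | w :: rest => pvFixWord w :: pvLoopA rest

def add_quotes_to_keys_fast_py (logline : String) : String :=
  let words := PySem.Chars.splitOn logline.toList ['=']
  String.ofList (PySem.Chars.join [':'] (pvLoopA words))

-- ===== PORT B =====
-- Source B's scan: 'run' is the current key token (characters that are neither space nor
-- the separator); the appends to 'out' become the returned list built front-to-back.
def pvScanB : List Char → List Char → List Char
  | run, [] => run
  | run, c :: rest =>
    if c = '=' then '"' :: run ++ '"' :: ':' :: pvScanB [] rest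
    else if c = ' ' then run ++ ' ' :: pvScanB [] rest
    else pvScanB (run ++ [c]) rest

def add_quotes_to_keys_fast_py_alt (logline : String) : String :=
  String.ofList (pvScanB [] logline.toList)

-- ===== PRECONDITION & SPEC =====
def Spec_add_quotes_to_keys_fast_py (logline : String) (out : String) : Prop := out = add_quotes_to_keys_fast_py_alt logline
instance (logline : String) (out : String) : Decidable (Spec_add_quotes_to_keys_fast_py logline out) := by unfold Spec_add_quotes_to_keys_fast_py; infer_instance

-- ===== CLAIM (what is proved, stated in full; the proofs are below) =====
def Claim_equal_add_quotes_to_keys_fast_py : Prop := ∀ (logline : String), Dom_add_quotes_to_keys_fast_py logline → Spec_add_quotes_to_keys_fast_py logline (add_quotes_to_keys_fast_py logline)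

-- ===== LEMMAS AND PROOFS =====

-- clean recursion computing splitOn · ['=']
def pvConsHead (p : List Char) : List (List Char) → List (List Char)
  | [] => [p]
  | w :: ws => (p ++ w) :: ws

def pvSplitEq : List Char → List (List Char)
  | [] => [[]]
  | c :: rest => if c = '=' then [] :: pvSplitEq rest else pvConsHead [c] (pvSplitEq rest)

lemma pvSplitEq_ne_nil (l : List Char) : pvSplitEq l ≠ [] := by
  cases l with
  | nil => simp [pvSplitEq]
  | cons c rest =>
    simp only [pvSplitEq]
    split
    · simp
    · cases h : pvSplitEq rest <;> simp [pvConsHead]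

lemma pvConsHead_consHead (p q : List Char) (S : List (List Char)) :
    pvConsHead p (pvConsHead q S) = pvConsHead (p ++ q) S := by
  cases S <;> simp [pvConsHead]

lemma pv_go_eq (l : List Char) : ∀ (fuel : Nat) (cur : List Char) (acc : List (List Char)),
    l.length + 1 ≤ fuel →
    PySem.Chars.splitOn.go ['='] fuel l cur acc = acc.reverse ++ pvConsHead cur.reverse (pvSplitEq l) := by
  induction l with
  | nil =>
    intro fuel cur acc h
    match fuel with
    | f + 1 => simp [PySem.Chars.splitOn.go, pvSplitEq, pvConsHead]
  | cons c rest ih =>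
    intro fuel cur acc h
    match fuel with
    | f + 1 =>
      by_cases hc : c = '='
      · subst hc
        have hpre : List.isPrefixOf ['='] ('=' :: rest) = true := by simp [List.isPrefixOf]
        rw [show PySem.Chars.splitOn.go ['='] (f + 1) ('=' :: rest) cur acc
              = PySem.Chars.splitOn.go ['='] f rest [] (cur.reverse :: acc) by
            simp [PySem.Chars.splitOn.go, hpre]]
        rw [ih f [] (cur.reverse :: acc) (by simpa using h)]
        cases hs : pvSplitEq rest with
        | nil => exact absurd hs (pvSplitEq_ne_nil rest)
        | cons w ws => simp [pvSplitEq, pvConsHead, hs]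
      · have hpre : List.isPrefixOf ['='] (c :: rest) = false := by
          simp [List.isPrefixOf]
          intro hcc; exact hc hcc.symm
        rw [show PySem.Chars.splitOn.go ['='] (f + 1) (c :: rest) cur acc
              = PySem.Chars.splitOn.go ['='] f rest (c :: cur) acc by
            simp [PySem.Chars.splitOn.go, hpre]]
        rw [ih f (c :: cur) acc (by simpa using h)]
        cases hs : pvSplitEq rest with
        | nil => exact absurd hs (pvSplitEq_ne_nil rest)
        | cons w ws =>
          simp [pvSplitEq, hc, hs, pvConsHead]

lemma pv_splitOn_eq (l : List Char) : PySem.Chars.splitOn l ['='] = pvSplitEq l := by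
  rw [show PySem.Chars.splitOn l ['='] = PySem.Chars.splitOn.go ['='] (l.length + 1) l [] [] from rfl]
  rw [pv_go_eq l (l.length + 1) [] [] le_rfl]
  cases hs : pvSplitEq l with
  | nil => exact absurd hs (pvSplitEq_ne_nil l)
  | cons w ws => simp [pvConsHead]

-- rfind · [' '] facts
lemma pv_rfind_go_none (s : List Char) (h : ' ' ∉ s) :
    ∀ j : Nat, PySem.Chars.rfind.go s [' '] j = -1 := by
  intro j
  induction j with
  | zero =>
    simp only [PySem.Chars.rfind.go]
    cases s with
    | nil => simp [List.isPrefixOf]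
    | cons a t =>
      have : ¬ (' ' = a) := fun hh => h (hh ▸ List.mem_cons_self)
      simp [List.isPrefixOf, this]
  | succ j ihj =>
    simp only [PySem.Chars.rfind.go]
    have : List.isPrefixOf [' '] (List.drop (j + 1) s) = false := by
      cases hd : List.drop (j + 1) s with
      | nil => simp [List.isPrefixOf]
      | cons a t =>
        have ha : a ∈ s := by
          have : a ∈ List.drop (j + 1) s := hd ▸ List.mem_cons_self
          exact List.mem_of_mem_drop this
        have : ¬ (' ' = a) := fun hh => h (hh ▸ ha)
        simp [List.isPrefixOf, this]
    simp [this, ihj]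

lemma pv_rfind_none (s : List Char) (h : ' ' ∉ s) : PySem.Chars.rfind s [' '] = -1 :=
  pv_rfind_go_none s h s.length

lemma pv_rfind_ge (s sub : List Char) : ∀ j : Nat, -1 ≤ PySem.Chars.rfind.go s sub j := by
  intro j
  induction j with
  | zero => simp only [PySem.Chars.rfind.go]; split <;> omega
  | succ j ihj =>
    simp only [PySem.Chars.rfind.go]
    split
    · omega
    · exact ihj

lemma pv_rfind_go_shift (run w : List Char) :
    ∀ j : Nat, PySem.Chars.rfind.go (run ++ ' ' :: w) [' '] (run.length + 1 + j)
      = (run.length : Int) + 1 + PySem.Chars.rfind.go w [' '] j := by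
  intro j
  induction j with
  | zero =>
    have hdrop : List.drop (run.length + 1) (run ++ ' ' :: w) = w := by
      simp
    rw [show run.length + 1 + 0 = run.length + 1 from rfl]
    simp only [PySem.Chars.rfind.go, hdrop]
    by_cases hp : List.isPrefixOf [' '] w = true
    · simp [hp]
    · simp only [Bool.not_eq_true] at hp
      simp only [hp, Bool.false_eq_true, if_false]
      -- go at index run.length returns run.length: it sees the inserted ' '
      cases hn : run with
      | nil =>
        simp only [List.nil_append, List.length_nil]
        simp [PySem.Chars.rfind.go, List.isPrefixOf]
      | cons a t =>
        have hlen : (a :: t).length = t.length + 1 := by simp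
        rw [hlen]
        have hdrop2 : List.drop (t.length + 1) ((a :: t) ++ ' ' :: w) = ' ' :: w := by
          simp
        simp only [PySem.Chars.rfind.go, hdrop2]
        simp [List.isPrefixOf]
  | succ j ihj =>
    have e : run.length + 1 + (j + 1) = (run.length + 1 + j) + 1 := by omega
    have hdrop : List.drop (run.length + 1 + j + 1) (run ++ ' ' :: w) = List.drop (j + 1) w := by
      rw [List.drop_append]
      have e1 : run.length + 1 + j + 1 - run.length = j + 2 := by omega
      simp [e1]
      omega
    rw [e]
    conv_rhs => rw [show (PySem.Chars.rfind.go w [' '] (j+1))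
        = if List.isPrefixOf [' '] (List.drop (j + 1) w) = true then ((j:Int) + 1)
          else PySem.Chars.rfind.go w [' '] j by
      simp only [PySem.Chars.rfind.go]; split <;> [push_cast; skip] <;> ring_nf]
    simp only [PySem.Chars.rfind.go, hdrop]
    split
    · push_cast; ring
    · exact ihj

lemma pv_rfind_shift (run w : List Char) :
    PySem.Chars.rfind (run ++ ' ' :: w) [' '] = (run.length : Int) + 1 + PySem.Chars.rfind w [' '] := by
  have hlen : (run ++ ' ' :: w).length = run.length + 1 + w.length := by simp; omega
  rw [show PySem.Chars.rfind (run ++ ' ' :: w) [' ']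
        = PySem.Chars.rfind.go (run ++ ' ' :: w) [' '] ((run ++ ' ' :: w).length) from rfl]
  rw [hlen, pv_rfind_go_shift run w w.length]
  rfl

-- the key word-level lemma
lemma pv_fixWord_prepend (run w : List Char) :
    pvFixWord (run ++ ' ' :: w) = run ++ ' ' :: pvFixWord w := by
  have hr := pv_rfind_shift run w
  have hge : -1 ≤ PySem.Chars.rfind w [' '] := pv_rfind_ge w [' '] w.length
  set r := PySem.Chars.rfind w [' '] with hrdef
  by_cases hneg : r = -1
  · -- no space in the tail word: the last space is the inserted one
    have hw : pvFixWord w = '"' :: w ++ ['"'] := by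
      rw [pvFixWord, ← hrdef, hneg]; simp
    rw [pvFixWord, hr, hneg]
    have hne : (run.length : Int) + 1 + -1 ≠ -1 := by omega
    simp only [hne, ne_eq, not_false_iff, if_pos]
    rw [PySem.List.slice_to _ (by omega), PySem.List.slice_from _ (by omega)]
    have e1 : ((run.length : Int) + 1 + -1).toNat = run.length := by omega
    have e2 : ((run.length : Int) + 1 + -1 + 1).toNat = run.length + 1 := by omega
    rw [e1, e2]
    have t1 : List.take run.length (run ++ ' ' :: w) = run := by
      simp
    have t2 : List.drop (run.length + 1) (run ++ ' ' :: w) = w := by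
      simp [List.drop_append]
    rw [t1, t2, hw]
    simp
  · have hge0 : 0 ≤ r := by omega
    have hw : pvFixWord w = PySem.List.slice w none (some r) ++ ' ' :: '"' ::
        PySem.List.slice w (some (r + 1)) none ++ ['"'] := by
      rw [pvFixWord, ← hrdef]
      simp [hneg]
    rw [pvFixWord, hr]
    have hne : (run.length : Int) + 1 + r ≠ -1 := by omega
    simp only [hne, ne_eq, not_false_iff, if_pos]
    rw [PySem.List.slice_to _ (by omega), PySem.List.slice_from _ (by omega)]
    rw [hw, PySem.List.slice_to _ (by omega), PySem.List.slice_from _ (by omega)]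
    have e1 : ((run.length : Int) + 1 + r).toNat = run.length + 1 + r.toNat := by omega
    have e2 : ((run.length : Int) + 1 + r + 1).toNat = run.length + 1 + (r.toNat + 1) := by omega
    have e3 : (r + 1).toNat = r.toNat + 1 := by omega
    rw [e1, e2, e3]
    have t1 : List.take (run.length + 1 + r.toNat) (run ++ ' ' :: w)
        = run ++ ' ' :: List.take r.toNat w := by
      rw [List.take_append]
      have : run.length + 1 + r.toNat - run.length = r.toNat + 1 := by omega
      simp [this]
      omega
    have t2 : List.drop (run.length + 1 + (r.toNat + 1)) (run ++ ' ' :: w)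
        = List.drop (r.toNat + 1) w := by
      rw [List.drop_append]
      have : run.length + 1 + (r.toNat + 1) - run.length = r.toNat + 2 := by omega
      simp [this]
      omega
    rw [t1, t2]
    simp

lemma pv_fixWord_nospace (w : List Char) (h : ' ' ∉ w) :
    pvFixWord w = '"' :: w ++ ['"'] := by
  simp [pvFixWord, pv_rfind_none w h]

-- join/loop level
lemma pv_join_loop_cons (w : List Char) (x : List Char) (xs : List (List Char)) :
    PySem.Chars.join [':'] (pvLoopA (w :: x :: xs))
      = pvFixWord w ++ ':' :: PySem.Chars.join [':'] (pvLoopA (x :: xs)) := by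
  have : pvLoopA (w :: x :: xs) = pvFixWord w :: pvLoopA (x :: xs) := by
    simp [pvLoopA]
  rw [this]
  cases hl : pvLoopA (x :: xs) with
  | nil => cases xs <;> simp [pvLoopA] at hl
  | cons p ps => rw [PySem.Chars.join_cons_cons]; simp

-- main invariant
lemma pv_scan_eq (l : List Char) : ∀ (run : List Char), ' ' ∉ run →
    pvScanB run l = PySem.Chars.join [':'] (pvLoopA (pvConsHead run (pvSplitEq l))) := by
  induction l with
  | nil =>
    intro run _
    simp [pvScanB, pvSplitEq, pvConsHead, pvLoopA, PySem.Chars.join_singleton]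
  | cons c rest ih =>
    intro run hrun
    by_cases hc : c = '='
    · subst hc
      rw [show pvScanB run ('=' :: rest) = '"' :: run ++ '"' :: ':' :: pvScanB [] rest by
        simp [pvScanB]]
      rw [ih [] (by simp)]
      cases hs : pvSplitEq rest with
      | nil => exact absurd hs (pvSplitEq_ne_nil rest)
      | cons w ws =>
        rw [show pvConsHead [] (w :: ws) = w :: ws by simp [pvConsHead]]
        rw [show pvSplitEq ('=' :: rest) = [] :: pvSplitEq rest by simp [pvSplitEq]]
        rw [hs]
        rw [show pvConsHead run ([] :: w :: ws) = run :: w :: ws by simp [pvConsHead]]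
        rw [pv_join_loop_cons run w ws, pv_fixWord_nospace run hrun]
        simp
    · by_cases hsp : c = ' '
      · subst hsp
        rw [show pvScanB run (' ' :: rest) = run ++ ' ' :: pvScanB [] rest by
          simp [pvScanB]]
        rw [ih [] (by simp)]
        cases hs : pvSplitEq rest with
        | nil => exact absurd hs (pvSplitEq_ne_nil rest)
        | cons w ws =>
          rw [show pvConsHead [] (w :: ws) = w :: ws by simp [pvConsHead]]
          rw [show pvSplitEq (' ' :: rest) = pvConsHead [' '] (pvSplitEq rest) by
            simp [pvSplitEq]]
          rw [hs]
          rw [show pvConsHead run (pvConsHead [' '] (w :: ws)) = (run ++ ' ' :: w) :: ws by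
            simp [pvConsHead]]
          cases ws with
          | nil => simp [pvLoopA, PySem.Chars.join_singleton]
          | cons x xs =>
            rw [pv_join_loop_cons (run ++ ' ' :: w) x xs,
                pv_join_loop_cons w x xs,
                pv_fixWord_prepend run w]
            simp
      · rw [show pvScanB run (c :: rest) = pvScanB (run ++ [c]) rest by
          simp [pvScanB, hc, hsp]]
        have hrun' : ' ' ∉ run ++ [c] := by
          simp [hrun]
          exact fun hh => hsp hh.symm
        rw [ih (run ++ [c]) hrun']
        simp only [pvSplitEq, if_neg hc, pvConsHead_consHead]

-- ===== VERDICT (by name: the statement is the Claim_ definition above) =====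
theorem add_quotes_to_keys_fast_py_spec : Claim_equal_add_quotes_to_keys_fast_py := by
  intro logline _
  unfold Spec_add_quotes_to_keys_fast_py add_quotes_to_keys_fast_py add_quotes_to_keys_fast_py_alt
  rw [pv_splitOn_eq, pv_scan_eq logline.toList [] (by simp)]
  cases hs : pvSplitEq logline.toList with
  | nil => exact absurd hs (pvSplitEq_ne_nil logline.toList)
  | cons w ws => simp [pvConsHead]
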